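-- pv_equiv track=rewrite | github.com/sfmalloy/advent-of-code-2016 | solutions/d21.py | part2
-- ===== SOURCE A (Python) =====
-- from collections import deque, defaultdict
--
-- def part2(prog: list[str]):
--     word = deque('fbgdceah')
--     for line in reversed(prog):
--         match line.split():
--             case ['swap', 'position', x, 'with', 'position', y]:
--                 a = int(x)
--                 b = int(y)
--                 word[a], word[b] = word[b], word[a]
--             case ['swap', 'letter', x, 'with', 'letter', y]:
--                 a = word.index(x)
--                 b = word.index(y)
--                 word[a], word[b] = word[b], word[a]
--             case ['rotate', d, x, 'step' | 'steps']:
--                 a = int(x)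
--                 word.rotate(a if d == 'left' else -a)
--             case ['rotate', 'based', 'on', 'position', 'of', 'letter', x]:
--                 a = word.index(x)
--                 match a:
--                     case 1: i = 1
--                     case 3: i = 2
--                     case 5: i = 3
--                     case 7: i = 4
--                     case 0: i = 1
--                     case 2: i = 6
--                     case 4: i = 7
--                     case 6: i = 8
--                 word.rotate(-i)
--             case ['reverse', 'positions', x, 'through', y]:
--                 a = int(x)
--                 b = int(y)
--                 for i, c in enumerate(reversed([word[i] for i in range(a, b+1)]), start=a):
--                     word[i] = c
--             case ['move', 'position', x, 'to', 'position', y]: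
--                 a = int(y)
--                 b = int(x)
--                 v = word[a]
--                 word.remove(v)
--                 word.insert(b, v)
--     return ''.join(word)
-- ===== SOURCE B (Python) =====
-- from itertools import permutations
--
--
-- def _parse(line):
--     t = line.split()
--     if t[:2] == ['swap', 'position'] and t[3:5] == ['with', 'position'] and len(t) == 6:
--         return ('sp', int(t[2]), int(t[5]))
--     if t[:2] == ['swap', 'letter'] and t[3:5] == ['with', 'letter'] and len(t) == 6:
--         return ('sl', t[2], t[5])
--     if len(t) == 4 and t[0] == 'rotate' and t[3] in ('step', 'steps'):
--         a = int(t[2])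
--         return ('ro', a % 8 if t[1] == 'left' else (-a) % 8)
--     if len(t) == 7 and t[:6] == ['rotate', 'based', 'on', 'position', 'of', 'letter']:
--         return ('rb', t[6])
--     if len(t) == 5 and t[:2] == ['reverse', 'positions'] and t[3] == 'through':
--         return ('rv', int(t[2]), int(t[4]))
--     if t[:2] == ['move', 'position'] and t[3:5] == ['to', 'position'] and len(t) == 6:
--         return ('mv', int(t[2]), int(t[5]))
--     return None
--
--
-- def part2(prog: list[str]):
--     ops = [op for op in map(_parse, prog) if op is not None]
--     target = list('fbgdceah')
--     for cand in permutations('abcdefgh'):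
--         w = list(cand)
--         for op in ops:
--             k = op[0]
--             if k == 'sp':
--                 a, b = op[1], op[2]
--                 w[a], w[b] = w[b], w[a]
--             elif k == 'sl':
--                 i, j = w.index(op[1]), w.index(op[2])
--                 w[i], w[j] = w[j], w[i]
--             elif k == 'ro':
--                 n = op[1]
--                 w = w[n:] + w[:n]
--             elif k == 'rb':
--                 i = w.index(op[1])
--                 n = (-(1 + i + (1 if i >= 4 else 0))) % 8
--                 w = w[n:] + w[:n]
--             elif k == 'rv':
--                 a, b = op[1], op[2]
--                 w[a:b + 1] = w[a:b + 1][::-1]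
--             else:
--                 v = w.pop(op[1])
--                 w.insert(op[2], v)
--         if w == target:
--             return ''.join(cand)
--     return ''
-- ===== Notes on version B (the rewrite author's own statement) =====
-- stated objective: alternative
-- what changed: Instead of stepping backwards through the instructions applying hand-built inverse operations (with an inverse lookup table for rotate-based-on-position), B parses the instructions once and searches the 8! permutations of 'abcdefgh', applying the scramble FORWARD to each candidate and returning the one that scrambles to 'fbgdceah'.
-- outside the precondition, e.g. on part2(['reverse positions -2 through 1']): A returns 'hagdcebf', B returns 'fbgdceah'; on part2(['move position -1 to position 2']): A returns 'fbdceagh', B returns 'fbdceahg'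
import Mathlib
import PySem

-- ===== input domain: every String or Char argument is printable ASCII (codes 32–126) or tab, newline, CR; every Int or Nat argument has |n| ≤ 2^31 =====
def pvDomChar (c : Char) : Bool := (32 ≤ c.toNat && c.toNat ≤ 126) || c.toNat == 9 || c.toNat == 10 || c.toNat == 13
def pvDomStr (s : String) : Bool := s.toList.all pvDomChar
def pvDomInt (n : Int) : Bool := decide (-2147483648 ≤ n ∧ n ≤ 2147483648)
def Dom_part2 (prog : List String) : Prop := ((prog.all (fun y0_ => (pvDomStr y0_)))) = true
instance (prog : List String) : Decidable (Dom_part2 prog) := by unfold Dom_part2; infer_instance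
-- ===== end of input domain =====

-- B replaces A's reversed pass of hand-built inverse operations by a forward search: it scrambles
-- every permutation of 'abcdefgh' with the instructions in original order and returns the one that
-- scrambles to 'fbgdceah' (alternative algorithm, not faster).

-- ===== PORT A =====

-- deque.rotate(n): rotate right by n (any sign); a right rotation by n is a left rotation by (-n) mod len
def rotateDeque (w : List Char) (n : Int) : List Char :=
  if w.length = 0 then w
  else
    let k := (PySem.Int.mod (-n) (w.length : Int)).toNat
    w.drop k ++ w.take k

-- one iteration of A's 'for line in reversed(prog)' body; indexing is total (pyGetD/pySetD):
-- Pre_part2 keeps every index used in range, so this is exact there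
def invStep (w : List Char) (line : String) : List Char :=
  match PySem.Str.split₀ line with
  | ["swap", "position", x, "with", "position", y] =>
    match PySem.Int.ofStr? x, PySem.Int.ofStr? y with
    | some a, some b =>
        let vb := PySem.List.pyGetD w b ' '
        let va := PySem.List.pyGetD w a ' '
        PySem.List.pySetD (PySem.List.pySetD w a vb) b va
    | _, _ => w  -- int() ValueError: excluded by Pre_part2
  | ["swap", "letter", x, "with", "letter", y] =>
    match x.toList, y.toList with
    | [cx], [cy] =>
      match PySem.List.index? w cx, PySem.List.index? w cy with
      | some a, some b => (w.set a (w.getD b ' ')).set b (w.getD a ' ')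
      | _, _ => w  -- ValueError: excluded by Pre_part2
    | _, _ => w  -- token not a single letter: index() ValueError, excluded by Pre_part2
  | ["rotate", d, x, s] =>
    if s == "step" || s == "steps" then
      match PySem.Int.ofStr? x with
      | some a => rotateDeque w (if d == "left" then a else -a)
      | none => w  -- int() ValueError: excluded by Pre_part2
    else w
  | ["rotate", "based", "on", "position", "of", "letter", x] =>
    match x.toList with
    | [cx] =>
      match PySem.List.index? w cx with
      | some a =>
        -- A's inner 'match a' lookup table (a is always 0..7: the word keeps length 8)
        let i : Int :=
          if a = 1 then 1 else if a = 3 then 2 else if a = 5 then 3 else if a = 7 then 4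
          else if a = 0 then 1 else if a = 2 then 6 else if a = 4 then 7 else 8
        rotateDeque w (-i)
      | none => w  -- ValueError: excluded by Pre_part2
    | _ => w
  | ["reverse", "positions", x, "through", y] =>
    match PySem.Int.ofStr? x, PySem.Int.ofStr? y with
    | some a, some b =>
        (PySem.List.enumerate (((PySem.List.pyRange a (b + 1) 1).map
            (fun i => PySem.List.pyGetD w i ' ')).reverse) a).foldl
          (fun acc p => PySem.List.pySetD acc p.1 p.2) w
    | _, _ => w
  | ["move", "position", x, "to", "position", y] =>
    match PySem.Int.ofStr? x, PySem.Int.ofStr? y with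
    | some xv, some yv =>
        let a := yv
        let b := xv
        let v := PySem.List.pyGetD w a ' '
        match PySem.List.remove? w v with
        | some w' => PySem.List.insert w' b v
        | none => w
    | _, _ => w
  | _ => w

def part2 (prog : List String) : String :=
  String.ofList (prog.reverse.foldl invStep "fbgdceah".toList)

-- ===== PORT B =====

inductive SOp where
  | sp : Int → Int → SOp
  | sl : String → String → SOp
  | ro : Int → SOp
  | rb : String → SOp
  | rv : Int → Int → SOp
  | mv : Int → Int → SOp

-- Source B's _parse (None for a line that matches no instruction shape, or an int() ValueError — the
-- latter is excluded by Pre_part2)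
def parseOp (line : String) : Option SOp :=
  match PySem.Str.split₀ line with
  | ["swap", "position", x, "with", "position", y] =>
    match PySem.Int.ofStr? x, PySem.Int.ofStr? y with
    | some a, some b => some (.sp a b) | _, _ => none
  | ["swap", "letter", x, "with", "letter", y] => some (.sl x y)
  | ["rotate", d, x, s] =>
    if s == "step" || s == "steps" then
      match PySem.Int.ofStr? x with
      | some a => some (.ro (if d == "left" then PySem.Int.mod a 8 else PySem.Int.mod (-a) 8))
      | none => none
    else none
  | ["rotate", "based", "on", "position", "of", "letter", x] => some (.rb x)
  | ["reverse", "positions", x, "through", y] =>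
    match PySem.Int.ofStr? x, PySem.Int.ofStr? y with
    | some a, some b => some (.rv a b) | _, _ => none
  | ["move", "position", x, "to", "position", y] =>
    match PySem.Int.ofStr? x, PySem.Int.ofStr? y with
    | some a, some b => some (.mv a b) | _, _ => none
  | _ => none

-- Source B's forward application of one parsed op ('w = w[n:] + w[:n]' is the two slices; the rv slice
-- assignment keeps CPython's rule that the stop index is clamped to at least the start)
def fwdStep (w : List Char) (op : SOp) : List Char :=
  match op with
  | .sp a b =>
      let vb := PySem.List.pyGetD w b ' '
      let va := PySem.List.pyGetD w a ' '
      PySem.List.pySetD (PySem.List.pySetD w a vb) b va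
  | .sl x y =>
      match x.toList, y.toList with
      | [cx], [cy] =>
        match PySem.List.index? w cx, PySem.List.index? w cy with
        | some i, some j => (w.set i (w.getD j ' ')).set j (w.getD i ' ')
        | _, _ => w
      | _, _ => w
  | .ro n => PySem.List.slice w (some n) none ++ PySem.List.slice w none (some n)
  | .rb x =>
      match x.toList with
      | [cx] =>
        match PySem.List.index? w cx with
        | some i =>
          let n := PySem.Int.mod (-(1 + (i : Int) + (if 4 ≤ i then 1 else 0))) 8
          PySem.List.slice w (some n) none ++ PySem.List.slice w none (some n)
        | none => w
      | _ => w
  | .rv a b =>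
      PySem.List.slice w none (some a) ++ (PySem.List.slice w (some a) (some (b + 1))).reverse
        ++ w.drop (max (PySem.List.clampIdx w.length a) (PySem.List.clampIdx w.length (b + 1)))
  | .mv a b =>
      match PySem.List.pop? w a with
      | some (v, w') => PySem.List.insert w' b v
      | none => w

def part2_alt (prog : List String) : String :=
  let ops := prog.filterMap parseOp
  match (PySem.List.permutations "abcdefgh".toList 8).find?
      (fun p => ops.foldl fwdStep p == "fbgdceah".toList) with
  | some p => String.ofList p
  | none => ""

-- ===== PRECONDITION & SPEC =====

def intIdx8 (x : String) : Bool :=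
  match PySem.Int.ofStr? x with
  | some n => decide (0 ≤ n ∧ n < 8)
  | none => false

def letterAH (x : String) : Bool :=
  match x.toList with
  | [c] => "abcdefgh".toList.contains c
  | _ => false

def lineOk (line : String) : Bool :=
  match PySem.Str.split₀ line with
  | ["swap", "position", x, "with", "position", y] => intIdx8 x && intIdx8 y
  | ["swap", "letter", x, "with", "letter", y] => letterAH x && letterAH y
  | ["rotate", _, x, s] => !(s == "step" || s == "steps") || (PySem.Int.ofStr? x).isSome
  | ["rotate", "based", "on", "position", "of", "letter", x] => letterAH x
  | ["reverse", "positions", x, "through", y] => intIdx8 x && intIdx8 y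
  | ["move", "position", x, "to", "position", y] => intIdx8 x && intIdx8 y
  | _ => true

-- Pre_ excludes instructions whose numeric argument is outside 0..7 or whose letter argument is not
-- one of a..h: there A raises (IndexError/ValueError) or both programs' values are accidents of
-- Python's negative-index and slice conventions, which A's inverse pass and B's forward slicing
-- resolve differently.
def Pre_part2 (prog : List String) : Prop := ∀ l ∈ prog, lineOk l = true
instance (prog : List String) : Decidable (Pre_part2 prog) := by unfold Pre_part2; infer_instance

def pvWitness_part2 : List String :=
  ["swap position 0 with position 1", "rotate based on position of letter a",
   "rotate left 3 steps", "reverse positions 1 through 6", "move position 2 to position 5",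
   "swap letter c with letter h", "not an instruction"]

def Spec_part2 (prog : List String) (out : String) : Prop := out = part2_alt prog
instance (prog : List String) (out : String) : Decidable (Spec_part2 prog out) := by
  unfold Spec_part2; infer_instance

-- ===== CLAIM (what is proved, stated in full; the proofs are below) =====
def Claim_equal_part2 : Prop :=
  ∀ (prog : List String), Dom_part2 prog → Pre_part2 prog → Spec_part2 prog (part2 prog)

-- ===== LEMMAS AND PROOFS =====


-- proof-side constants and core word operations
def BASE : List Char := "abcdefgh".toList
def TGT : List Char := "fbgdceah".toList
def PermB (w : List Char) : Prop := w.Perm BASE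

theorem permB_length {w : List Char} (h : PermB w) : w.length = 8 := by
  simpa using h.length_eq
theorem permB_nodup {w : List Char} (h : PermB w) : w.Nodup :=
  (List.Perm.nodup_iff h).mpr (by decide)
theorem permB_tgt : PermB TGT := by unfold PermB; decide
theorem permB_trans {u w : List Char} (h : u.Perm w) (hw : PermB w) : PermB u := h.trans hw
theorem mem_of_memBASE {w : List Char} (hw : PermB w) {c : Char} (hc : c ∈ BASE) : c ∈ w :=
  hw.mem_iff.mpr hc

-- index of a letter from a getElem fact, on a duplicate-free word
theorem idxOf_eq_of_getElem {w : List Char} {c : Char} {k : Nat} (hn : w.Nodup)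
    (hk : k < w.length) (he : w[k] = c) : w.idxOf c = k := by
  have h1 : c ∈ w := he ▸ List.getElem_mem hk
  have h2 : w.idxOf c < w.length := List.idxOf_lt_length_of_mem h1
  have h3 : w[w.idxOf c] = c := List.getElem_idxOf h2
  exact (List.Nodup.getElem_inj_iff hn (hi := h2) (hj := hk)).mp (by rw [h3, he])

-- the two-index swap both programs perform
def swapN (w : List Char) (i j : Nat) : List Char :=
  (w.set i (w.getD j ' ')).set j (w.getD i ' ')

theorem swapN_perm {w : List Char} {i j : Nat} (hi : i < w.length) (hj : j < w.length) :
    (swapN w i j).Perm w := by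
  unfold swapN
  rw [List.getD_eq_getElem w ' ' hi, List.getD_eq_getElem w ' ' hj]
  exact List.set_set_perm hi hj

theorem swapN_length (w : List Char) (i j : Nat) : (swapN w i j).length = w.length := by
  simp [swapN]

theorem swapN_getElem {w : List Char} {i j : Nat} (hi : i < w.length) (hj : j < w.length)
    (k : Nat) (hk : k < w.length) :
    (swapN w i j)[k]'(by rw [swapN_length]; exact hk) =
      if k = j then w[i] else if k = i then w[j] else w[k] := by
  unfold swapN
  simp only [List.getElem_set]
  split_ifs with h1 h2 h3 h4 h5 <;>
    first
      | (exact List.getD_eq_getElem w ' ' hi)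
      | (exact List.getD_eq_getElem w ' ' hj)
      | rfl
      | omega

theorem swapN_self {w : List Char} {i : Nat} (hi : i < w.length) : swapN w i i = w := by
  apply List.ext_getElem (by rw [swapN_length])
  intro k hk hk'
  rw [swapN_getElem hi hi k hk']
  split_ifs <;> simp_all

theorem swapN_invol {w : List Char} {i j : Nat} (hi : i < w.length) (hj : j < w.length) :
    swapN (swapN w i j) i j = w := by
  apply List.ext_getElem (by rw [swapN_length, swapN_length])
  intro k hk hk'
  have hi' : i < (swapN w i j).length := by rw [swapN_length]; exact hi
  have hj' : j < (swapN w i j).length := by rw [swapN_length]; exact hj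
  rw [swapN_getElem hi' hj' k (by rw [swapN_length]; exact hk'),
    swapN_getElem hi hj i hi, swapN_getElem hi hj j hj, swapN_getElem hi hj k hk']
  split_ifs <;> simp_all
theorem swapN_cancel {w : List Char} {i j : Nat} (hi : i < w.length) (hj : j < w.length) :
    swapN (swapN w i j) j i = w := by
  apply List.ext_getElem (by rw [swapN_length, swapN_length])
  intro k hk hk'
  have hi' : i < (swapN w i j).length := by rw [swapN_length]; exact hi
  have hj' : j < (swapN w i j).length := by rw [swapN_length]; exact hj
  rw [swapN_getElem hj' hi' k (by rw [swapN_length]; exact hk'),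
    swapN_getElem hi hj j hj, swapN_getElem hi hj i hi, swapN_getElem hi hj k hk']
  split_ifs <;> simp_all

-- left rotation
def rotl (w : List Char) (t : Nat) : List Char := w.drop t ++ w.take t

theorem rotl_perm (w : List Char) (t : Nat) : (rotl w t).Perm w := by
  calc (w.drop t ++ w.take t).Perm (w.take t ++ w.drop t) := List.perm_append_comm
  _ = w := List.take_append_drop t w

theorem rotl_length (w : List Char) (t : Nat) : (rotl w t).length = w.length := by
  simp [rotl]; omega

theorem rotl_zero (w : List Char) : rotl w 0 = w := by simp [rotl]
theorem rotl_len (w : List Char) : rotl w w.length = w := by simp [rotl]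

theorem rotl_rotl (w : List Char) {t s : Nat} (ht : t ≤ w.length) (hts : t + s = w.length) :
    rotl (rotl w t) s = w := by
  have hlen : (w.drop t).length = s := by simp; omega
  unfold rotl
  rw [List.drop_left' hlen, List.take_left' hlen]
  exact List.take_append_drop t w

theorem rotl_rotl_mod (w : List Char) {t s : Nat} (hw : w.length = 8) (ht : t ≤ 8) (hs : s ≤ 8)
    (h : (t + s) % 8 = 0) : rotl (rotl w t) s = w := by
  rcases Nat.lt_or_ge (t + s) 8 with hlt | hge
  · have ht0 : t = 0 := by omega
    have hs0 : s = 0 := by omega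
    rw [ht0, hs0, rotl_zero, rotl_zero]
  · rcases Nat.lt_or_ge (t + s) 16 with hlt2 | hge2
    · exact rotl_rotl w (hw ▸ ht) (by omega)
    · have ht8 : t = 8 := by omega
      have hs8 : s = 8 := by omega
      rw [ht8, hs8, ← hw, rotl_len, rotl_len]

theorem rotl_getElem {w : List Char} {t k : Nat} (hw : w.length = 8) (ht : t ≤ 8) (hk : k < 8) :
    (rotl w t)[k]'(by rw [rotl_length, hw]; exact hk) =
      if h : k < 8 - t then w[t + k]'(by omega) else w[k - (8 - t)]'(by omega) := by
  unfold rotl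
  have hd : (w.drop t).length = 8 - t := by simp [hw]
  split_ifs with h
  · rw [List.getElem_append_left (by omega)]
    simp [List.getElem_drop]
  · rw [List.getElem_append_right (by omega)]
    simp [hd, List.getElem_take]

theorem idxOf_rotl {w : List Char} {c : Char} {a t : Nat} (hw : w.length = 8) (hn : w.Nodup)
    (ha : a < 8) (he : w[a]'(by omega) = c) (ht : t ≤ 8) :
    (rotl w t).idxOf c = (a + 8 - t) % 8 := by
  have hn' : (rotl w t).Nodup := ((rotl_perm w t).nodup_iff).mpr hn
  have hk : (a + 8 - t) % 8 < 8 := by omega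
  apply idxOf_eq_of_getElem hn' (by rw [rotl_length, hw]; exact hk)
  rw [rotl_getElem hw ht hk]
  split_ifs with h
  · have : t + (a + 8 - t) % 8 = a := by omega
    simp only [this, he]
  · have : (a + 8 - t) % 8 - (8 - t) = a := by omega
    simp only [this, he]

-- reversal of the segment [a, a+n)
def revSeg (w : List Char) (a n : Nat) : List Char :=
  w.take a ++ ((w.drop a).take n).reverse ++ w.drop (a + n)

theorem seg_decomp (w : List Char) (a n : Nat) :
    w = w.take a ++ (w.drop a).take n ++ w.drop (a + n) := by
  conv_lhs => rw [← List.take_append_drop a w]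
  rw [List.append_assoc]
  congr 1
  conv_lhs => rw [← List.take_append_drop n (w.drop a)]
  rw [List.drop_drop]

theorem revSeg_perm (w : List Char) (a n : Nat) : (revSeg w a n).Perm w := by
  conv_rhs => rw [seg_decomp w a n]
  unfold revSeg
  exact ((List.reverse_perm _).append_left _).append_right _

theorem revSeg_append {a n : Nat} (X Y Z : List Char) (ha : X.length = a) (hn : Y.length = n) :
    revSeg (X ++ Y ++ Z) a n = X ++ Y.reverse ++ Z := by
  have hXY : (X ++ Y).length = a + n := by simp [ha, hn]
  have e1 : List.take a (X ++ Y ++ Z) = X := by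
    rw [List.append_assoc]; exact List.take_left' ha
  have e2 : List.take n (List.drop a (X ++ Y ++ Z)) = Y := by
    rw [List.append_assoc, List.drop_left' ha]; exact List.take_left' hn
  have e3 : List.drop (a + n) (X ++ Y ++ Z) = Z := List.drop_left' hXY
  unfold revSeg
  rw [e1, e2, e3]

theorem revSeg_revSeg {w : List Char} {a n : Nat} (h : a + n ≤ w.length) :
    revSeg (revSeg w a n) a n = w := by
  have ha : (w.take a).length = a := by simp; omega
  have hn : ((w.drop a).take n).length = n := by simp; omega
  have hd : revSeg w a n = w.take a ++ ((w.drop a).take n).reverse ++ w.drop (a + n) := rfl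
  rw [hd, revSeg_append _ _ _ ha (by simp [hn]), List.reverse_reverse]
  exact (seg_decomp w a n).symm

-- insertIdx as take/cons/drop
theorem insertIdx_eq_take_cons_drop {w : List Char} {n : Nat} (v : Char) (h : n ≤ w.length) :
    w.insertIdx n v = w.take n ++ v :: w.drop n := by
  induction w generalizing n with
  | nil => simp at h; simp [h]
  | cons x xs ih =>
    cases n with
    | zero => simp
    | succ m => simp [List.insertIdx_succ_cons, ih (by simpa using h)]

theorem idxOf?_eq_some_idxOf {w : List Char} {c : Char} (h : c ∈ w) :
    w.idxOf? c = some (w.idxOf c) := by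
  induction w with
  | nil => simp at h
  | cons x xs ih =>
    by_cases hx : x = c
    · simp [List.idxOf?_cons, hx]
    · have hm : c ∈ xs := by
        rcases List.mem_cons.mp h with h1 | h1
        · exact absurd h1.symm hx
        · exact h1
      simp [List.idxOf?_cons, hx, ih hm]

theorem index?_eq_some_idxOf {w : List Char} {c : Char} (h : c ∈ w) :
    PySem.List.index? w c = some (w.idxOf c) := by
  rw [PySem.List.index?_eq_idxOf?]
  exact idxOf?_eq_some_idxOf h

-- which parsed ops Pre_part2 lets through
def opOk : SOp → Prop
  | .sp a b => 0 ≤ a ∧ a < 8 ∧ 0 ≤ b ∧ b < 8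
  | .sl x y => (∃ c, x.toList = [c] ∧ c ∈ BASE) ∧ ∃ c, y.toList = [c] ∧ c ∈ BASE
  | .ro n => 0 ≤ n ∧ n < 8
  | .rb x => ∃ c, x.toList = [c] ∧ c ∈ BASE
  | .rv a b => 0 ≤ a ∧ a < 8 ∧ 0 ≤ b ∧ b < 8
  | .mv a b => 0 ≤ a ∧ a < 8 ∧ 0 ≤ b ∧ b < 8

-- reductions of B's forward step to the core operations
theorem fwd_sp {w : List Char} {a b : Int} (hw : w.length = 8)
    (h : 0 ≤ a ∧ a < 8 ∧ 0 ≤ b ∧ b < 8) :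
    fwdStep w (.sp a b) = swapN w a.toNat b.toNat := by
  obtain ⟨h1, h2, h3, h4⟩ := h
  show PySem.List.pySetD (PySem.List.pySetD w a (PySem.List.pyGetD w b ' ')) b
      (PySem.List.pyGetD w a ' ') = _
  rw [PySem.List.pyGetD_eq_getElem w ' ' h3 (by omega), PySem.List.pyGetD_eq_getElem w ' ' h1 (by omega),
    PySem.List.pySetD_of_nonneg w _ h1, PySem.List.pySetD_of_nonneg _ _ h3]
  unfold swapN
  rw [List.getD_eq_getElem w ' ' (by omega), List.getD_eq_getElem w ' ' (by omega)]

theorem fwd_sl {w : List Char} {x y : String} {cx cy : Char} (hx : x.toList = [cx])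
    (hy : y.toList = [cy]) (hcx : cx ∈ w) (hcy : cy ∈ w) :
    fwdStep w (.sl x y) = swapN w (w.idxOf cx) (w.idxOf cy) := by
  show (match x.toList, y.toList with
      | [cx], [cy] =>
        match PySem.List.index? w cx, PySem.List.index? w cy with
        | some i, some j => (w.set i (w.getD j ' ')).set j (w.getD i ' ')
        | _, _ => w
      | _, _ => w) = _
  rw [hx, hy]
  simp only [index?_eq_some_idxOf hcx, index?_eq_some_idxOf hcy]
  rfl

theorem fwd_ro {w : List Char} {n : Int} (h1 : 0 ≤ n) :
    fwdStep w (.ro n) = rotl w n.toNat := by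
  show PySem.List.slice w (some n) none ++ PySem.List.slice w none (some n) = _
  rw [PySem.List.slice_from w h1, PySem.List.slice_to w h1]
  rfl

theorem fwd_rb {w : List Char} {x : String} {cx : Char} (hx : x.toList = [cx]) (hcx : cx ∈ w) :
    fwdStep w (.rb x) =
      rotl w ((PySem.Int.mod (-(1 + (w.idxOf cx : Int) +
        (if 4 ≤ w.idxOf cx then 1 else 0))) 8).toNat) := by
  show (match x.toList with
      | [cx] =>
        match PySem.List.index? w cx with
        | some i =>
          let n := PySem.Int.mod (-(1 + (i : Int) + (if 4 ≤ i then 1 else 0))) 8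
          PySem.List.slice w (some n) none ++ PySem.List.slice w none (some n)
        | none => w
      | _ => w) = _
  rw [hx]
  simp only [index?_eq_some_idxOf hcx]
  have hm0 : 0 ≤ PySem.Int.mod (-(1 + (w.idxOf cx : Int) + (if 4 ≤ w.idxOf cx then 1 else 0))) 8 :=
    PySem.Int.mod_nonneg _ (by omega)
  rw [PySem.List.slice_from w hm0, PySem.List.slice_to w hm0]
  rfl

theorem fwd_rv {w : List Char} {a b : Int} (hw : w.length = 8)
    (h : 0 ≤ a ∧ a < 8 ∧ 0 ≤ b ∧ b < 8) :
    fwdStep w (.rv a b) = revSeg w a.toNat (b + 1 - a).toNat := by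
  obtain ⟨h1, h2, h3, h4⟩ := h
  show PySem.List.slice w none (some a) ++ (PySem.List.slice w (some a) (some (b + 1))).reverse
      ++ w.drop (max (PySem.List.clampIdx w.length a) (PySem.List.clampIdx w.length (b + 1))) = _
  rw [PySem.List.slice_to w h1, PySem.List.slice_toNat w h1 (by omega)]
  have hca : PySem.List.clampIdx w.length a = a.toNat := by
    rw [show a = ((a.toNat : Nat) : Int) from by omega, PySem.List.clampIdx_natCast]
    omega
  have hcb : PySem.List.clampIdx w.length (b + 1) = (b + 1).toNat := by
    rw [show b + 1 = (((b + 1).toNat : Nat) : Int) from by omega, PySem.List.clampIdx_natCast]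
    omega
  rw [hca, hcb]
  unfold revSeg
  have e1 : (b + 1).toNat - a.toNat = (b + 1 - a).toNat := by omega
  have e2 : max a.toNat (b + 1).toNat = a.toNat + (b + 1 - a).toNat := by omega
  rw [e1, e2]

theorem fwd_mv {w : List Char} {a b : Int} (hw : w.length = 8)
    (h : 0 ≤ a ∧ a < 8 ∧ 0 ≤ b ∧ b < 8) :
    fwdStep w (.mv a b) =
      (w.eraseIdx a.toNat).insertIdx b.toNat (w[a.toNat]'(by omega)) := by
  obtain ⟨h1, h2, h3, h4⟩ := h
  show (match PySem.List.pop? w a with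
      | some (v, w') => PySem.List.insert w' b v
      | none => w) = _
  have ha : a = ((a.toNat : Nat) : Int) := by omega
  have hb : b = ((b.toNat : Nat) : Int) := by omega
  conv_lhs => rw [ha, PySem.List.pop?_natCast w a.toNat (by omega)]
  simp only
  conv_lhs => rw [hb, PySem.List.insert_natCast _ _ _
    (by rw [List.length_eraseIdx_of_lt (by omega)]; omega)]
  rw [insertIdx_eq_take_cons_drop _ (by rw [List.length_eraseIdx_of_lt (by omega)]; omega)]

-- the left-rotation amount of A's inverse lookup table
def invAmt (a : Nat) : Nat :=
  if a = 1 then 1 else if a = 3 then 2 else if a = 5 then 3 else if a = 7 then 4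
  else if a = 0 then 1 else if a = 2 then 6 else if a = 4 then 7 else 0

-- the inverse of each forward op (proof-side witness; A's pass computes exactly this)
def gOp (op : SOp) : List Char → List Char :=
  match op with
  | .sp a b => fun u => swapN u a.toNat b.toNat
  | .sl x y => fun u =>
      match x.toList, y.toList with
      | [cx], [cy] => swapN u (u.idxOf cx) (u.idxOf cy)
      | _, _ => u
  | .ro n => fun u => rotl u ((8 - n.toNat) % 8)
  | .rb x => fun u =>
      match x.toList with
      | [cx] => rotl u (invAmt (u.idxOf cx))
      | _ => u
  | .rv a b => fun u => revSeg u a.toNat (b + 1 - a).toNat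
  | .mv a b => fun u => (u.eraseIdx b.toNat).insertIdx a.toNat (u.getD b.toNat ' ')

theorem invAmt_le (a : Nat) : invAmt a ≤ 8 := by
  unfold invAmt; split_ifs <;> omega

theorem gOp_permB (op : SOp) (hop : opOk op) (u : List Char) (hu : PermB u) :
    PermB (gOp op u) := by
  have hlen : u.length = 8 := permB_length hu
  cases op with
  | sp a b =>
    obtain ⟨h1, h2, h3, h4⟩ := hop
    exact permB_trans (swapN_perm (by omega) (by omega)) hu
  | sl x y =>
    obtain ⟨⟨cx, hx, hcxB⟩, cy, hy, hcyB⟩ := hop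
    have hcx : cx ∈ u := mem_of_memBASE hu hcxB
    have hcy : cy ∈ u := mem_of_memBASE hu hcyB
    show PermB (match x.toList, y.toList with
      | [cx], [cy] => swapN u (u.idxOf cx) (u.idxOf cy)
      | _, _ => u)
    rw [hx, hy]
    exact permB_trans (swapN_perm (List.idxOf_lt_length_of_mem hcx)
      (List.idxOf_lt_length_of_mem hcy)) hu
  | ro n => exact permB_trans (rotl_perm _ _) hu
  | rb x =>
    obtain ⟨cx, hx, hcxB⟩ := hop
    show PermB (match x.toList with
      | [cx] => rotl u (invAmt (u.idxOf cx))
      | _ => u)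
    rw [hx]
    exact permB_trans (rotl_perm _ _) hu
  | rv a b => exact permB_trans (revSeg_perm _ _ _) hu
  | mv a b =>
    obtain ⟨h1, h2, h3, h4⟩ := hop
    have hb : b.toNat < u.length := by omega
    have hgd : u.getD b.toNat ' ' = u[b.toNat] := List.getD_eq_getElem u ' ' hb
    show PermB ((u.eraseIdx b.toNat).insertIdx a.toNat (u.getD b.toNat ' '))
    have hp1 : ((u.eraseIdx b.toNat).insertIdx a.toNat (u.getD b.toNat ' ')).Perm
        (u.getD b.toNat ' ' :: u.eraseIdx b.toNat) :=
      List.perm_insertIdx _ _ (by rw [List.length_eraseIdx_of_lt hb]; omega)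
    have hp2 : (u[b.toNat] :: u.eraseIdx b.toNat).Perm u :=
      List.getElem_cons_eraseIdx_perm hb
    exact permB_trans (hp1.trans (hgd ▸ hp2)) hu

theorem fwd_gOp (op : SOp) (hop : opOk op) (u : List Char) (hu : PermB u) :
    fwdStep (gOp op u) op = u := by
  have hlen : u.length = 8 := permB_length hu
  have hnd : u.Nodup := permB_nodup hu
  have hgu : PermB (gOp op u) := gOp_permB op hop u hu
  have hglen : (gOp op u).length = 8 := permB_length hgu
  have hgnd : (gOp op u).Nodup := permB_nodup hgu
  cases op with
  | sp a b =>
    obtain ⟨h1, h2, h3, h4⟩ := hop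
    rw [fwd_sp hglen ⟨h1, h2, h3, h4⟩]
    exact swapN_invol (by omega) (by omega)
  | sl x y =>
    obtain ⟨⟨cx, hx, hcxB⟩, cy, hy, hcyB⟩ := hop
    have hcx : cx ∈ u := mem_of_memBASE hu hcxB
    have hcy : cy ∈ u := mem_of_memBASE hu hcyB
    have hg : gOp (.sl x y) u = swapN u (u.idxOf cx) (u.idxOf cy) := by
      show (match x.toList, y.toList with
        | [cx], [cy] => swapN u (u.idxOf cx) (u.idxOf cy)
        | _, _ => u) = _
      rw [hx, hy]
    have hi : u.idxOf cx < u.length := List.idxOf_lt_length_of_mem hcx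
    have hj : u.idxOf cy < u.length := List.idxOf_lt_length_of_mem hcy
    rw [fwd_sl hx hy (hgu.mem_iff.mpr hcxB) (hgu.mem_iff.mpr hcyB), hg]
    by_cases hcc : cx = cy
    · subst hcc
      rw [swapN_self hi]
      rw [swapN_self hi]
    · have hij : u.idxOf cx ≠ u.idxOf cy := by
        intro hcon
        have h1 := List.getElem_idxOf hi
        have h2 := List.getElem_idxOf hj
        simp only [hcon] at h1
        exact hcc (h1.symm.trans h2)
      have e1 : (swapN u (u.idxOf cx) (u.idxOf cy)).idxOf cx = u.idxOf cy := by
        apply idxOf_eq_of_getElem (((swapN_perm hi hj).nodup_iff).mpr hnd)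
          (by rw [swapN_length]; exact hj)
        rw [swapN_getElem hi hj _ hj]
        simp [List.getElem_idxOf hi]
      have e2 : (swapN u (u.idxOf cx) (u.idxOf cy)).idxOf cy = u.idxOf cx := by
        apply idxOf_eq_of_getElem (((swapN_perm hi hj).nodup_iff).mpr hnd)
          (by rw [swapN_length]; exact hi)
        rw [swapN_getElem hi hj _ hi]
        simp [List.getElem_idxOf hj, hij]
      rw [e1, e2]
      exact swapN_cancel hi hj
  | ro n =>
    obtain ⟨h1, h2⟩ := hop
    rw [fwd_ro h1]
    exact rotl_rotl_mod u hlen (by omega) (by omega) (by omega)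
  | rb x =>
    obtain ⟨cx, hx, hcxB⟩ := hop
    have hcx : cx ∈ u := mem_of_memBASE hu hcxB
    have hg : gOp (.rb x) u = rotl u (invAmt (u.idxOf cx)) := by
      show (match x.toList with
        | [cx] => rotl u (invAmt (u.idxOf cx))
        | _ => u) = _
      rw [hx]
    rw [fwd_rb hx (hgu.mem_iff.mpr hcxB), hg]
    have ha : u.idxOf cx < 8 := hlen ▸ List.idxOf_lt_length_of_mem hcx
    have he : u[u.idxOf cx]'(by omega) = cx := List.getElem_idxOf _
    have hidx : (rotl u (invAmt (u.idxOf cx))).idxOf cx =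
        (u.idxOf cx + 8 - invAmt (u.idxOf cx)) % 8 :=
      idxOf_rotl hlen hnd ha he (invAmt_le _)
    rw [hg] at *
    rw [hidx]
    set a := u.idxOf cx with ha'
    interval_cases a <;>
      · apply rotl_rotl_mod u hlen (invAmt_le _) (by decide) (by decide)
  | rv a b =>
    obtain ⟨h1, h2, h3, h4⟩ := hop
    rw [fwd_rv hglen ⟨h1, h2, h3, h4⟩]
    show revSeg (revSeg u a.toNat (b + 1 - a).toNat) a.toNat (b + 1 - a).toNat = u
    exact revSeg_revSeg (by omega)
  | mv a b =>
    obtain ⟨h1, h2, h3, h4⟩ := hop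
    have hbu : b.toNat < u.length := by omega
    have hgd : u.getD b.toNat ' ' = u[b.toNat] := List.getD_eq_getElem u ' ' hbu
    have hle : a.toNat ≤ (u.eraseIdx b.toNat).length := by
      rw [List.length_eraseIdx_of_lt hbu]; omega
    have hgdef : gOp (.mv a b) u
        = (u.eraseIdx b.toNat).insertIdx a.toNat (u.getD b.toNat ' ') := rfl
    rw [hgdef] at hglen ⊢
    rw [fwd_mv hglen ⟨h1, h2, h3, h4⟩]
    have e2 : ∀ hp : a.toNat < ((u.eraseIdx b.toNat).insertIdx a.toNat
          (u.getD b.toNat ' ')).length,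
        ((u.eraseIdx b.toNat).insertIdx a.toNat (u.getD b.toNat ' '))[a.toNat]'hp
          = u.getD b.toNat ' ' :=
      fun _ => List.getElem_insertIdx_self
        (by rw [List.length_insertIdx_of_le_length hle]; omega)
    simp only [e2]
    rw [List.eraseIdx_insertIdx_self, hgd]
    exact List.insertIdx_eraseIdx_getElem hbu

-- every permutation of a duplicate-free list occurs in PySem's itertools.permutations
theorem mem_permutations_of_perm :
    ∀ (u xs : List Char), xs.Nodup → u.Perm xs → u ∈ PySem.List.permutations xs xs.length := by
  intro u
  induction u with
  | nil =>
    intro xs _ hp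
    have : xs = [] := hp.symm.eq_nil
    subst this
    simp [PySem.List.permutations_zero]
  | cons x u' ih =>
    intro xs hnd hp
    have hx : x ∈ xs := hp.mem_iff.mp (by simp)
    have hi : xs.idxOf x < xs.length := List.idxOf_lt_length_of_mem hx
    have hg : xs[xs.idxOf x] = x := List.getElem_idxOf hi
    have hxs : xs.length = u'.length + 1 := by
      have := hp.length_eq; simpa using this.symm
    have hperm : xs.Perm (x :: xs.eraseIdx (xs.idxOf x)) := by
      have h0 := List.getElem_cons_eraseIdx_perm hi
      rw [hg] at h0
      exact h0.symm
    have hu' : u'.Perm (xs.eraseIdx (xs.idxOf x)) :=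
      ((hp.trans hperm).cons_inv)
    have hnd' : (xs.eraseIdx (xs.idxOf x)).Nodup :=
      hnd.sublist (List.eraseIdx_sublist xs (xs.idxOf x))
    have hlen' : (xs.eraseIdx (xs.idxOf x)).length = u'.length := by
      rw [List.length_eraseIdx_of_lt hi]; omega
    have hmem := ih (xs.eraseIdx (xs.idxOf x)) hnd' hu'
    rw [hxs, PySem.List.permutations_succ]
    apply List.mem_flatMap.mpr
    refine ⟨xs.idxOf x, List.mem_range.mpr hi, ?_⟩
    have hget : xs[xs.idxOf x]? = some x := by
      rw [List.getElem?_eq_getElem hi, hg]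
    rw [hget]
    apply List.mem_map.mpr
    exact ⟨u', by rw [← hlen']; exact hmem, rfl⟩
  
-- find? returns the unique satisfying element
theorem find?_eq_some_of_unique {α : Type} (p : α → Bool) (l : List α) (u : α)
    (hu : u ∈ l) (hpu : p u = true) (huniq : ∀ v ∈ l, p v = true → v = u) :
    l.find? p = some u := by
  induction l with
  | nil => simp at hu
  | cons x xs ih =>
    by_cases hpx : p x = true
    · have : x = u := huniq x (by simp) hpx
      subst this
      simp [hpx]
    · have hxu : x ≠ u := fun h => hpx (h ▸ hpu)
      have hu' : u ∈ xs := by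
        rcases List.mem_cons.mp hu with h | h
        · exact absurd h.symm hxu
        · exact h
      simp only [List.find?_cons, Bool.not_eq_true] at *
      rw [hpx]
      exact ih hu' fun v hv hpv => huniq v (by simp [hv]) hpv

def PermSet : Set (List Char) := {w | PermB w}

theorem permSet_finite : PermSet.Finite := by
  apply Set.Finite.subset (List.finite_toSet (PySem.List.permutations BASE 8))
  intro w hw
  have : w ∈ PySem.List.permutations BASE BASE.length :=
    mem_permutations_of_perm w BASE (by decide) hw
  simpa using this

theorem fwdStep_mapsTo_injOn (op : SOp) (hop : opOk op) :
    (∀ v, PermB v → PermB (fwdStep v op)) ∧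
    (∀ v₁ v₂, PermB v₁ → PermB v₂ → fwdStep v₁ op = fwdStep v₂ op → v₁ = v₂) := by
  have hgm : Set.MapsTo (gOp op) PermSet PermSet := fun w hw => gOp_permB op hop w hw
  have hginj : Set.InjOn (gOp op) PermSet := by
    intro w1 h1 w2 h2 heq
    have e1 := fwd_gOp op hop w1 h1
    have e2 := fwd_gOp op hop w2 h2
    rw [← e1, ← e2, heq]
  have hsurj : Set.SurjOn (gOp op) PermSet PermSet :=
    ((permSet_finite.injOn_iff_bijOn_of_mapsTo hgm).mp hginj).surjOn
  constructor
  · intro v hv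
    obtain ⟨w, hw, hgw⟩ := hsurj hv
    rw [← hgw, fwd_gOp op hop w hw]
    exact hw
  · intro v1 v2 h1 h2 heq
    obtain ⟨w1, hw1, hg1⟩ := hsurj h1
    obtain ⟨w2, hw2, hg2⟩ := hsurj h2
    rw [← hg1, fwd_gOp op hop w1 hw1] at heq
    rw [← hg2, fwd_gOp op hop w2 hw2] at heq
    rw [← hg1, ← hg2, heq]

-- A's swap assignment, as the core swap
theorem pySwap_eq {w : List Char} {a b : Int} (hw : w.length = 8)
    (h1 : 0 ≤ a) (h2 : a < 8) (h3 : 0 ≤ b) (h4 : b < 8) :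
    PySem.List.pySetD (PySem.List.pySetD w a (PySem.List.pyGetD w b ' ')) b
      (PySem.List.pyGetD w a ' ') = swapN w a.toNat b.toNat := by
  rw [PySem.List.pyGetD_eq_getElem w ' ' h3 (by omega), PySem.List.pyGetD_eq_getElem w ' ' h1
    (by omega), PySem.List.pySetD_of_nonneg w _ h1, PySem.List.pySetD_of_nonneg _ _ h3]
  unfold swapN
  rw [List.getD_eq_getElem w ' ' (by omega), List.getD_eq_getElem w ' ' (by omega)]

-- deque.rotate as the core left rotation
theorem rotateDeque_eq {w : List Char} (n : Int) (hw : w.length = 8) :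
    rotateDeque w n = rotl w ((PySem.Int.mod (-n) 8).toNat) := by
  unfold rotateDeque rotl
  rw [hw]
  norm_num

-- A's write-back loop over an enumerated segment
theorem setLoop_eq (ys : List Char) : ∀ (w : List Char) (a : Nat), a + ys.length ≤ w.length →
    (PySem.List.enumerate ys ((a : Nat) : Int)).foldl
        (fun acc p => PySem.List.pySetD acc p.1 p.2) w
      = w.take a ++ ys ++ w.drop (a + ys.length) := by
  induction ys with
  | nil =>
    intro w a h
    simp only [PySem.List.enumerate_nil, List.foldl_nil, List.length_nil, List.append_nil,
      Nat.add_zero]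
    exact (List.take_append_drop a w).symm
  | cons y ys ih =>
    intro w a h
    rw [PySem.List.enumerate_cons]
    simp only [List.foldl_cons]
    have hc : ((a : Int) + 1) = (((a + 1 : Nat) : Nat) : Int) := by push_cast; ring
    have ha : a < w.length := by simp at h; omega
    rw [PySem.List.pySetD_natCast, hc, ih (w.set a y) (a + 1)
      (by rw [List.length_set]; simp at h ⊢; omega)]
    have hset : w.set a y = w.take a ++ y :: w.drop (a + 1) :=
      List.set_eq_take_cons_drop y ha
    have e1 : (w.set a y).take (a + 1) = w.take a ++ [y] := by
      rw [hset, List.take_append, List.take_of_length_le (by simp <;> omega)]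
      congr 1
      have h5 : a + 1 - (w.take a).length = 1 := by simp <;> omega
      rw [h5]
      rfl
    have e2 : (w.set a y).drop (a + 1 + ys.length) = w.drop (a + (y :: ys).length) := by
      rw [hset, List.drop_append, List.drop_of_length_le (by simp <;> omega)]
      have h5 : a + 1 + ys.length - (w.take a).length = ys.length + 1 := by simp <;> omega
      rw [h5, List.nil_append, List.drop_succ_cons, List.drop_drop]
      congr 1
      simp <;> omega
    rw [e1, e2]
    simp [List.append_assoc]

-- the list comprehension [word[i] for i in range(a, b+1)]
theorem seg_eq {w : List Char} {a b : Int} (hw : w.length = 8)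
    (h1 : 0 ≤ a) (h2 : a < 8) (h3 : 0 ≤ b) (h4 : b < 8) :
    (PySem.List.pyRange a (b + 1) 1).map (fun i => PySem.List.pyGetD w i ' ')
      = (w.drop a.toNat).take ((b + 1 - a).toNat) := by
  apply List.ext_getElem
  · simp [PySem.List.length_pyRange_one, hw]; omega
  · intro k hk1 hk2
    have hkr : k < (b + 1 - a).toNat := by
      simpa [PySem.List.length_pyRange_one] using hk1
    have hget : (PySem.List.pyRange a (b + 1) 1)[k]'(by
        rw [PySem.List.length_pyRange_one]; omega) = a + k :=
      PySem.List.getElem_pyRange_one ..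
    simp only [List.getElem_map, hget]
    rw [PySem.List.pyGetD_eq_getElem w ' ' (by omega) (by rw [hw]; omega)]
    rw [List.getElem_take, List.getElem_drop]
    congr 1
    omega

theorem setLoop_eq_int (ys : List Char) (w : List Char) (a : Int) (h0 : 0 ≤ a)
    (h : a.toNat + ys.length ≤ w.length) :
    (PySem.List.enumerate ys a).foldl (fun acc p => PySem.List.pySetD acc p.1 p.2) w
      = w.take a.toNat ++ ys ++ w.drop (a.toNat + ys.length) := by
  have ha : a = ((a.toNat : Nat) : Int) := by omega
  rw [ha, setLoop_eq ys w a.toNat (by simpa using h), Int.toNat_natCast]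

-- A's reverse pass computes exactly the core inverse of the op B parses, line by line
theorem invStep_good (l : String) (hok : lineOk l = true) (w : List Char) (hw : PermB w) :
    (parseOp l = none → invStep w l = w) ∧
    ∀ op, parseOp l = some op → opOk op ∧ invStep w l = gOp op w := by
  have hlen : w.length = 8 := permB_length hw
  have hnd : w.Nodup := permB_nodup hw
  unfold invStep
  split
  case _ x y heq =>
    -- swap position x with position y
    unfold lineOk at hok
    rw [heq] at hok
    simp only [Bool.and_eq_true] at hok
    obtain ⟨hx, hy⟩ := hok
    unfold intIdx8 at hx hy
    cases hax : PySem.Int.ofStr? x with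
    | none => rw [hax] at hx; simp at hx
    | some a =>
      cases hay : PySem.Int.ofStr? y with
      | none => rw [hay] at hy; simp at hy
      | some b =>
        rw [hax] at hx; rw [hay] at hy
        simp only [decide_eq_true_eq] at hx hy
        unfold parseOp
        rw [heq]
        simp only
        rw [hax, hay]
        simp only
        refine ⟨fun hc => by simp at hc, fun op hop => ?_⟩
        cases hop
        refine ⟨⟨hx.1, hx.2, hy.1, hy.2⟩, ?_⟩
        rw [pySwap_eq hlen hx.1 hx.2 hy.1 hy.2]
        rfl
  case _ x y heq =>
    -- swap letter x with letter y
    unfold lineOk at hok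
    rw [heq] at hok
    simp only [Bool.and_eq_true] at hok
    obtain ⟨hx, hy⟩ := hok
    unfold letterAH at hx hy
    cases hxl : x.toList with
    | nil => rw [hxl] at hx; simp at hx
    | cons cx tx =>
      cases tx with
      | cons _ _ => rw [hxl] at hx; simp at hx
      | nil =>
        cases hyl : y.toList with
        | nil => rw [hyl] at hy; simp at hy
        | cons cy ty =>
          cases ty with
          | cons _ _ => rw [hyl] at hy; simp at hy
          | nil =>
            rw [hxl] at hx; rw [hyl] at hy
            have hcxB : cx ∈ BASE := by simpa [BASE] using hx
            have hcyB : cy ∈ BASE := by simpa [BASE] using hy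
            have hcx : cx ∈ w := mem_of_memBASE hw hcxB
            have hcy : cy ∈ w := mem_of_memBASE hw hcyB
            unfold parseOp
            rw [heq]
            simp only
            simp only [hxl, hyl, index?_eq_some_idxOf hcx, index?_eq_some_idxOf hcy]
            refine ⟨fun hc => by simp at hc, fun op hop => ?_⟩
            cases hop
            refine ⟨⟨⟨cx, hxl, hcxB⟩, cy, hyl, hcyB⟩, ?_⟩
            have hg : gOp (.sl x y) w = swapN w (w.idxOf cx) (w.idxOf cy) := by
              show (match x.toList, y.toList with
                | [cx], [cy] => swapN w (w.idxOf cx) (w.idxOf cy)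
                | _, _ => w) = _
              rw [hxl, hyl]
            rw [hg]
            rfl
  case _ d x s heq =>
    -- rotate d x step(s)
    unfold lineOk at hok
    rw [heq] at hok
    simp only at hok
    unfold parseOp
    rw [heq]
    simp only
    by_cases hs : (s == "step" || s == "steps") = true
    · simp only [hs, if_true]
      simp only [hs, Bool.not_true, Bool.false_or] at hok
      obtain ⟨a, hax⟩ := Option.isSome_iff_exists.mp hok
      rw [hax]
      simp only
      refine ⟨fun hc => by simp at hc, fun op hop => ?_⟩
      cases hop
      have hm0 : ∀ t : Int, 0 ≤ PySem.Int.mod t 8 := fun t => PySem.Int.mod_nonneg t (by omega)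
      have hm8 : ∀ t : Int, PySem.Int.mod t 8 < 8 := fun t => PySem.Int.mod_lt t (by omega)
      refine ⟨⟨by split_ifs <;> exact hm0 _, by split_ifs <;> exact hm8 _⟩, ?_⟩
      rw [rotateDeque_eq _ hlen]
      by_cases hd : (d == "left") = true
      · simp only [hd, if_true]
        show rotl w _ = rotl w ((8 - (PySem.Int.mod a 8).toNat) % 8)
        congr 1
        rw [PySem.Int.mod_eq_emod_of_pos (by omega), PySem.Int.mod_eq_emod_of_pos (by omega)]
        omega
      · simp only [hd, Bool.false_eq_true, if_false]
        show rotl w _ = rotl w ((8 - (PySem.Int.mod (-a) 8).toNat) % 8)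
        congr 1
        rw [neg_neg, PySem.Int.mod_eq_emod_of_pos (by omega),
          PySem.Int.mod_eq_emod_of_pos (by omega)]
        omega
    · simp only [hs, if_false]
      exact ⟨fun _ => rfl, fun op hop => by simp at hop⟩
  case _ x heq =>
    -- rotate based on position of letter x
    unfold lineOk at hok
    rw [heq] at hok
    simp only at hok
    unfold letterAH at hok
    cases hxl : x.toList with
    | nil => rw [hxl] at hok; simp at hok
    | cons cx tx =>
      cases tx with
      | cons _ _ => rw [hxl] at hok; simp at hok
      | nil =>
        rw [hxl] at hok
        have hcxB : cx ∈ BASE := by simpa [BASE] using hok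
        have hcx : cx ∈ w := mem_of_memBASE hw hcxB
        unfold parseOp
        rw [heq]
        simp only
        simp only [hxl, index?_eq_some_idxOf hcx]
        refine ⟨fun hc => by simp at hc, fun op hop => ?_⟩
        cases hop
        refine ⟨⟨cx, hxl, hcxB⟩, ?_⟩
        have hg : gOp (.rb x) w = rotl w (invAmt (w.idxOf cx)) := by
          show (match x.toList with
            | [cx] => rotl w (invAmt (w.idxOf cx))
            | _ => w) = _
          rw [hxl]
        rw [hg, rotateDeque_eq _ hlen]
        congr 1
        rw [neg_neg]
        have ha : w.idxOf cx < 8 := hlen ▸ List.idxOf_lt_length_of_mem hcx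
        set a := w.idxOf cx with ha'
        interval_cases a <;> decide
  case _ x y heq =>
    -- reverse positions x through y
    unfold lineOk at hok
    rw [heq] at hok
    simp only [Bool.and_eq_true] at hok
    obtain ⟨hx, hy⟩ := hok
    unfold intIdx8 at hx hy
    cases hax : PySem.Int.ofStr? x with
    | none => rw [hax] at hx; simp at hx
    | some a =>
      cases hay : PySem.Int.ofStr? y with
      | none => rw [hay] at hy; simp at hy
      | some b =>
        rw [hax] at hx; rw [hay] at hy
        simp only [decide_eq_true_eq] at hx hy
        unfold parseOp
        rw [heq]
        simp only
        rw [hax, hay]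
        simp only
        refine ⟨fun hc => by simp at hc, fun op hop => ?_⟩
        cases hop
        refine ⟨⟨hx.1, hx.2, hy.1, hy.2⟩, ?_⟩
        rw [seg_eq hlen hx.1 hx.2 hy.1 hy.2]
        rw [setLoop_eq_int _ w a hx.1 (by simp <;> omega)]
        have hlrev : ((w.drop a.toNat).take ((b + 1 - a).toNat)).reverse.length
            = (b + 1 - a).toNat := by simp <;> omega
        rw [hlrev]
        rfl
  case _ x y heq =>
    -- move position x to position y
    unfold lineOk at hok
    rw [heq] at hok
    simp only [Bool.and_eq_true] at hok
    obtain ⟨hx, hy⟩ := hok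
    unfold intIdx8 at hx hy
    cases hax : PySem.Int.ofStr? x with
    | none => rw [hax] at hx; simp at hx
    | some a =>
      cases hay : PySem.Int.ofStr? y with
      | none => rw [hay] at hy; simp at hy
      | some b =>
        rw [hax] at hx; rw [hay] at hy
        simp only [decide_eq_true_eq] at hx hy
        unfold parseOp
        rw [heq]
        simp only
        rw [hax, hay]
        simp only
        refine ⟨fun hc => by simp at hc, fun op hop => ?_⟩
        cases hop
        refine ⟨⟨hx.1, hx.2, hy.1, hy.2⟩, ?_⟩
        have hbw : b.toNat < w.length := by omega
        have hv : PySem.List.pyGetD w b ' ' = w[b.toNat] :=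
          PySem.List.pyGetD_eq_getElem w ' ' hy.1 (by omega)
        have hmem : w[b.toNat] ∈ w := List.getElem_mem hbw
        rw [hv, PySem.List.remove?_eq_some_erase w _ hmem]
        simp only
        have herase : w.erase w[b.toNat] = w.eraseIdx b.toNat := by
          rw [List.erase_eq_eraseIdx_of_idxOf (idxOf_eq_of_getElem hnd hbw rfl)]
        rw [herase]
        have ha' : a = ((a.toNat : Nat) : Int) := by omega
        conv_lhs => rw [ha', PySem.List.insert_natCast _ _ _
          (by rw [List.length_eraseIdx_of_lt hbw]; omega)]
        rw [← insertIdx_eq_take_cons_drop _ (by rw [List.length_eraseIdx_of_lt hbw]; omega)]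
        show _ = gOp (.mv a b) w
        have hgd : w.getD b.toNat ' ' = w[b.toNat] := List.getD_eq_getElem w ' ' hbw
        show _ = (w.eraseIdx b.toNat).insertIdx a.toNat (w.getD b.toNat ' ')
        rw [hgd]
  case _ =>
    -- no instruction shape matches: both programs leave the word unchanged
    refine ⟨fun _ => rfl, fun op hop => ?_⟩
    unfold parseOp at hop
    split at hop <;> simp_all

-- running A's whole reversed pass, then B's forward scramble, is the identity
theorem invRun_good : ∀ (prog : List String), (∀ l ∈ prog, lineOk l = true) →
    ∀ w, PermB w →
      PermB (prog.reverse.foldl invStep w) ∧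
      (prog.filterMap parseOp).foldl fwdStep (prog.reverse.foldl invStep w) = w := by
  intro prog
  induction prog with
  | nil => exact fun _ w hw => ⟨hw, rfl⟩
  | cons l rest ih =>
    intro hok w hw
    have hrev : (l :: rest).reverse.foldl invStep w
        = invStep (rest.reverse.foldl invStep w) l := by
      rw [List.reverse_cons, List.foldl_append]
      rfl
    obtain ⟨hP, hF⟩ := ih (fun l' hl' => hok l' (by simp [hl'])) w hw
    have hlk := hok l (by simp)
    obtain ⟨hnone, hsome⟩ := invStep_good l hlk (rest.reverse.foldl invStep w) hP
    cases hp : parseOp l with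
    | none =>
      rw [hrev, hnone hp]
      refine ⟨hP, ?_⟩
      rw [List.filterMap_cons, hp]
      exact hF
    | some op =>
      obtain ⟨hopk, hinv⟩ := hsome op hp
      rw [hrev, hinv]
      refine ⟨gOp_permB op hopk _ hP, ?_⟩
      rw [List.filterMap_cons, hp]
      simp only [List.foldl_cons]
      rw [fwd_gOp op hopk _ hP]
      exact hF

theorem parsed_opOk (prog : List String) (h : ∀ l ∈ prog, lineOk l = true) :
    ∀ op ∈ prog.filterMap parseOp, opOk op := by
  intro op hop
  obtain ⟨l, hl, hpl⟩ := List.mem_filterMap.mp hop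
  exact ((invStep_good l (h l hl) BASE (List.Perm.refl _)).2 op hpl).1

theorem fwdRun_inj : ∀ (ops : List SOp), (∀ op ∈ ops, opOk op) →
    (∀ v, PermB v → PermB (ops.foldl fwdStep v)) ∧
    (∀ v₁ v₂, PermB v₁ → PermB v₂ →
      ops.foldl fwdStep v₁ = ops.foldl fwdStep v₂ → v₁ = v₂) := by
  intro ops
  induction ops with
  | nil => exact fun _ => ⟨fun v hv => hv, fun v₁ v₂ _ _ h => h⟩
  | cons op rest ih =>
    intro h
    obtain ⟨hm, hi⟩ := fwdStep_mapsTo_injOn op (h op (by simp))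
    obtain ⟨hm', hi'⟩ := ih (fun o ho => h o (by simp [ho]))
    refine ⟨fun v hv => hm' _ (hm v hv), fun v₁ v₂ h1 h2 he => ?_⟩
    simp only [List.foldl_cons] at he
    exact hi v₁ v₂ h1 h2 (hi' _ _ (hm v₁ h1) (hm v₂ h2) he)

theorem base_len8 : BASE.length = 8 := by decide

theorem part2_spec' (prog : List String) (hpre : Pre_part2 prog) :
    part2 prog = part2_alt prog := by
  unfold part2 part2_alt
  have hpre' : ∀ l ∈ prog, lineOk l = true := hpre
  obtain ⟨hP, hF⟩ := invRun_good prog hpre' "fbgdceah".toList permB_tgt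
  have hops := parsed_opOk prog hpre'
  obtain ⟨hmaps, hinj⟩ := fwdRun_inj (prog.filterMap parseOp) hops
  have hmem : prog.reverse.foldl invStep "fbgdceah".toList
      ∈ PySem.List.permutations "abcdefgh".toList 8 := by
    have h := mem_permutations_of_perm _ BASE (by decide) hP
    rwa [base_len8] at h
  have hfind : (PySem.List.permutations "abcdefgh".toList 8).find?
      (fun p => (prog.filterMap parseOp).foldl fwdStep p == "fbgdceah".toList)
      = some (prog.reverse.foldl invStep "fbgdceah".toList) := by
    apply find?_eq_some_of_unique _ _ _ hmem (by simpa using hF)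
    intro v hv hpv
    have hvP : PermB v := by
      have hv' : v ∈ PySem.List.permutations BASE BASE.length := by rwa [base_len8]
      exact PySem.List.perm_of_mem_permutations hv'
    have hveq : (prog.filterMap parseOp).foldl fwdStep v = "fbgdceah".toList := by
      simpa using hpv
    exact hinj v _ hvP hP (by rw [hveq, hF])
  simp only [hfind]

-- ===== VERDICT (by name: the statement is the Claim_ definition above) =====
theorem part2_spec : Claim_equal_part2 := by
  intro prog _ hpre
  exact part2_spec' prog hpre
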